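-- pv_equiv track=rewrite | github.com/max12354/MedGemma-Radiology-Assistant_Eng_AR | med.py | simple_splitter_by_paragraph_and_length
-- ===== SOURCE A (Python) =====
-- def simple_splitter_by_paragraph_and_length(text, max_chars_per_part=800): # Chars, not tokens
--     """A fallback splitter: by paragraph, then by max chars, trying to respect sentence ends."""
--     parts = []
--     paragraphs = text.split('\n')
--     for paragraph_text in paragraphs:
--         paragraph_text = paragraph_text.strip()
--         if not paragraph_text:
--             if parts and parts[-1] != "\n\n":
--                 parts.append("\n\n")
--             continue
--
--         current_paragraph_part = paragraph_text
--         while len(current_paragraph_part) > max_chars_per_part: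
--             split_point = -1
--             # Search backwards from max_chars_per_part for a sentence-ending punctuation
--             # Limit search to avoid excessively small initial splits if no punctuation found early
--             search_end_idx = max(0, max_chars_per_part - 200)
--             for i in range(min(len(current_paragraph_part)-1, max_chars_per_part), search_end_idx , -1):
--                 if current_paragraph_part[i] in ".!?":
--                     split_point = i + 1
--                     break
--             if split_point == -1 or split_point == 0: # No suitable punctuation or at the very beginning
--                 # If no good split point, take a hard cut or look for comma/space
--                 search_end_idx_space = max(0, max_chars_per_part - 50)
--                 for i in range(min(len(current_paragraph_part)-1, max_chars_per_part), search_end_idx_space , -1):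
--                     if current_paragraph_part[i] in " ,": # Prefer space or comma
--                         split_point = i + 1
--                         break
--                 if split_point == -1 or split_point == 0:
--                     split_point = max_chars_per_part # Force split at max_chars
--
--             parts.append(current_paragraph_part[:split_point].strip())
--             current_paragraph_part = current_paragraph_part[split_point:].strip()
--
--         if current_paragraph_part: # Add the remaining part of the paragraph
--             parts.append(current_paragraph_part)
--
--     # Consolidate parts, handling the added paragraph breaks correctly
--     final_parts = []
--     current_text_block = ""
--     for p_idx, p_val in enumerate(parts):
--         if p_val == "\n\n":
--             if current_text_block: # Add accumulated text before the paragraph break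
--                 final_parts.append(current_text_block)
--                 current_text_block = ""
--             if not final_parts or final_parts[-1] != "\n\n": # Avoid double paragraph breaks
--                 final_parts.append(p_val)
--         else:
--             if current_text_block and not current_text_block.endswith("\n\n"):
--                 current_text_block += " " + p_val # Add space if joining normal text parts
--             else: # Start new block or after a paragraph break
--                 current_text_block = p_val.strip()
--
--     if current_text_block: # Add any remaining text
--         final_parts.append(current_text_block)
--
--     return [fp for fp in final_parts if fp.strip() or fp == "\n\n"]
-- ===== SOURCE B (Python) =====
-- def _last_index(s, chars, lo, hi):
--     """Largest i in [lo, hi) with s[i] in chars, else -1 (forward scan keeping the last hit)."""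
--     best = -1
--     for i in range(lo, hi):
--         if s[i] in chars:
--             best = i
--     return best
--
--
-- def _chunks(s, maxc):
--     """Length-split a stripped paragraph into its stripped pieces, recursively."""
--     if len(s) <= maxc:
--         return [s] if s else []
--     hi = min(len(s) - 1, maxc) + 1
--     p = _last_index(s, ".!?", max(0, maxc - 200) + 1, hi)
--     if p < 0:
--         p = _last_index(s, " ,", max(0, maxc - 50) + 1, hi)
--     cut = p + 1 if p >= 0 else maxc
--     return [s[:cut].strip()] + _chunks(s[cut:].strip(), maxc)
--
--
-- def simple_splitter_by_paragraph_and_length(text, max_chars_per_part=800):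
--     """Single pass over the paragraphs: accumulate a running text block, flush on blank lines."""
--     out = []
--     block = ""
--     for para in text.split('\n'):
--         para = para.strip()
--         if not para:
--             if block:
--                 out.append(block)
--                 block = ""
--             if out and out[-1] != "\n\n":
--                 out.append("\n\n")
--         else:
--             for piece in _chunks(para, max_chars_per_part):
--                 block = block + " " + piece if block else piece
--     if block:
--         out.append(block)
--     return out
-- ===== Notes on version B (the rewrite author's own statement) =====
-- stated objective: simpler
-- what changed: A's two-phase build-then-consolidate (emit sentinel pieces into 'parts', then a second scan that re-joins them and dedups paragraph breaks, then a final filter) is fused into one scan over the paragraphs that maintains the running text block directly, with the length-splitting done by a recursive chunker whose split point comes from a forward keep-last scan instead of A's backward break-first scan; the final filter (provably a no-op) is dropped.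
import Mathlib
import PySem

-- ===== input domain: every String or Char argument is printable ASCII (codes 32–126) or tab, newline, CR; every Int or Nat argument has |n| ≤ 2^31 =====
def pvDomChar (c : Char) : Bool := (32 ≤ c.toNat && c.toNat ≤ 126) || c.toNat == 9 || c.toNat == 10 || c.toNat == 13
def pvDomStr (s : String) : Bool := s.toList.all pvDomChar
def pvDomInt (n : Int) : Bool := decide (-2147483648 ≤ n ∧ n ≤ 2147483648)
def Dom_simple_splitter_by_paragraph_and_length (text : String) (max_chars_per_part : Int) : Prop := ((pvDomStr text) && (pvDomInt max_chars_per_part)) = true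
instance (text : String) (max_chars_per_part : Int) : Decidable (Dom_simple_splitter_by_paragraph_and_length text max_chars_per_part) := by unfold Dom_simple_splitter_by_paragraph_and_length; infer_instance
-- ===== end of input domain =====

-- B fuses A's build-then-consolidate two-scan structure into a single scan over the paragraphs that
-- maintains the running text block directly (objective: simpler; the final filter, provably a no-op, is dropped).

def pvNl2 : List Char := ['\n', '\n']

-- ===== PORT A =====

-- backward scan from min(len-1, m) down to lo (exclusive): first split character found, as split_point i+1, else -1
def aSearch (cur : List Char) (chars : List Char) (m lo : Int) : Int :=
  match (PySem.List.pyRange (min ((cur.length : Int) - 1) m) lo (-1)).find?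
      (fun i => decide (PySem.List.pyGetD cur i ' ' ∈ chars)) with
  | some i => i + 1
  | none => -1

def aCut (cur : List Char) (m : Int) : Int :=
  let sp := aSearch cur ['.', '!', '?'] m (max 0 (m - 200))
  if sp = -1 ∨ sp = 0 then
    let sp2 := aSearch cur [' ', ','] m (max 0 (m - 50))
    if sp2 = -1 ∨ sp2 = 0 then m else sp2
  else sp

-- the 'while len(current_paragraph_part) > max_chars_per_part' loop; fuel ≥ len+1 suffices when m ≥ 1
def aWhile : Nat → List Char → Int → List (List Char) → List (List Char) × List Char
  | 0, cur, _, parts => (parts, cur)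
  | f + 1, cur, m, parts =>
    if (cur.length : Int) > m then
      let sp := aCut cur m
      aWhile f (PySem.Chars.strip (PySem.List.slice cur (some sp) none)) m
        (parts ++ [PySem.Chars.strip (PySem.List.slice cur none (some sp))])
    else (parts, cur)

def aParaStep (m : Int) (parts : List (List Char)) (para : List Char) : List (List Char) :=
  let p := PySem.Chars.strip para
  if p = [] then
    if parts ≠ [] ∧ PySem.List.pyGetD parts (-1) [] ≠ pvNl2 then parts ++ [pvNl2] else parts
  else
    let r := aWhile (p.length + 1) p m parts
    if r.2 = [] then r.1 else r.1 ++ [r.2]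

-- the consolidation loop body (state: final_parts, current_text_block)
def aCons (st : List (List Char) × List Char) (pv : List Char) : List (List Char) × List Char :=
  if pv = pvNl2 then
    let fin := if st.2 = [] then st.1 else st.1 ++ [st.2]
    (if fin = [] ∨ PySem.List.pyGetD fin (-1) [] ≠ pvNl2 then fin ++ [pvNl2] else fin, [])
  else if st.2 ≠ [] ∧ PySem.Chars.endswith st.2 pvNl2 = false then (st.1, st.2 ++ ' ' :: pv)
  else (st.1, PySem.Chars.strip pv)

def simple_splitter_by_paragraph_and_length (text : String) (max_chars_per_part : Int) : List String :=
  let parts := (PySem.Chars.splitOn text.toList ['\n']).foldl (aParaStep max_chars_per_part) []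
  let st := parts.foldl aCons ([], [])
  let fin := if st.2 = [] then st.1 else st.1 ++ [st.2]
  (fin.filter fun fp => !(PySem.Chars.strip fp).isEmpty || fp == pvNl2).map String.ofList

-- ===== PORT B =====

-- forward scan keeping the last index in [lo, hi) whose character is in chars, else -1
def bLastIdx (s : List Char) (chars : List Char) (lo hi : Int) : Int :=
  (PySem.List.pyRange lo hi 1).foldl
    (fun best i => if PySem.List.pyGetD s i ' ' ∈ chars then i else best) (-1)

-- recursive length-splitting of a stripped paragraph into stripped pieces; fuel ≥ len+1 suffices when m ≥ 1
def bChunks : Nat → List Char → Int → List (List Char)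
  | 0, _, _ => []
  | f + 1, s, m =>
    if (s.length : Int) ≤ m then (if s = [] then [] else [s])
    else
      let hi := min ((s.length : Int) - 1) m + 1
      let p0 := bLastIdx s ['.', '!', '?'] (max 0 (m - 200) + 1) hi
      let p := if p0 < 0 then bLastIdx s [' ', ','] (max 0 (m - 50) + 1) hi else p0
      let cut := if 0 ≤ p then p + 1 else m
      PySem.Chars.strip (PySem.List.slice s none (some cut)) ::
        bChunks f (PySem.Chars.strip (PySem.List.slice s (some cut) none)) m

-- one paragraph of the fused single scan (state: out, block)
def bParaStep (m : Int) (st : List (List Char) × List Char) (para : List Char) :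
    List (List Char) × List Char :=
  let p := PySem.Chars.strip para
  if p = [] then
    let out := if st.2 = [] then st.1 else st.1 ++ [st.2]
    (if out ≠ [] ∧ PySem.List.pyGetD out (-1) [] ≠ pvNl2 then out ++ [pvNl2] else out, [])
  else
    (st.1, (bChunks (p.length + 1) p m).foldl
      (fun blk piece => if blk = [] then piece else blk ++ ' ' :: piece) st.2)

def simple_splitter_by_paragraph_and_length_alt (text : String) (max_chars_per_part : Int) : List String :=
  let st := (PySem.Chars.splitOn text.toList ['\n']).foldl (bParaStep max_chars_per_part) ([], [])
  (if st.2 = [] then st.1 else st.1 ++ [st.2]).map String.ofList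

-- ===== PRECONDITION & SPEC =====
-- Pre_ excludes max_chars_per_part ≤ 0 together with a text having some non-blank line: on those inputs
-- A's while loop never makes progress and A DIVERGES (returns nothing), so there is nothing to match.
def Pre_simple_splitter_by_paragraph_and_length (text : String) (max_chars_per_part : Int) : Prop :=
  1 ≤ max_chars_per_part ∨
    ∀ q ∈ PySem.Chars.splitOn text.toList ['\n'], PySem.Chars.strip q = []
instance (text : String) (max_chars_per_part : Int) : Decidable (Pre_simple_splitter_by_paragraph_and_length text max_chars_per_part) := by unfold Pre_simple_splitter_by_paragraph_and_length; infer_instance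

def pvWitness_simple_splitter_by_paragraph_and_length : String × Int := ("a b. c", 4)

def Spec_simple_splitter_by_paragraph_and_length (text : String) (max_chars_per_part : Int) (out : List String) : Prop := out = simple_splitter_by_paragraph_and_length_alt text max_chars_per_part
instance (text : String) (max_chars_per_part : Int) (out : List String) : Decidable (Spec_simple_splitter_by_paragraph_and_length text max_chars_per_part out) := by unfold Spec_simple_splitter_by_paragraph_and_length; infer_instance

-- ===== CLAIM (what is proved, stated in full; the proofs are below) =====
def Claim_equal_simple_splitter_by_paragraph_and_length : Prop := ∀ (text : String) (max_chars_per_part : Int), Dom_simple_splitter_by_paragraph_and_length text max_chars_per_part → Pre_simple_splitter_by_paragraph_and_length text max_chars_per_part → Spec_simple_splitter_by_paragraph_and_length text max_chars_per_part (simple_splitter_by_paragraph_and_length text max_chars_per_part)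

-- ===== LEMMAS AND PROOFS =====

-- ---- character / strip layer ----

theorem pvHeadDropWhile {p : Char → Bool} : ∀ {l : List Char} {c : Char},
    (l.dropWhile p).head? = some c → p c = false := by
  intro l
  induction l with
  | nil => intro c h; simp [List.dropWhile] at h
  | cons a t ih =>
    intro c h
    by_cases hp : p a
    · rw [List.dropWhile_cons_of_pos hp] at h; exact ih h
    · rw [List.dropWhile_cons_of_neg hp] at h
      simp at h; subst h; simpa using hp

theorem pvPrefixHead? {u l : List Char} (h : u <+: l) (hu : u ≠ []) : l.head? = u.head? := by
  obtain ⟨t, rfl⟩ := h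
  cases u with
  | nil => exact absurd rfl hu
  | cons a s => simp

theorem pvRstripPrefix (s : List Char) : PySem.Chars.rstrip s <+: s := by
  have h := List.dropWhile_suffix (l := s.reverse) (p := PySem.Chars.isspace)
  have := h.reverse
  simpa [PySem.Chars.rstrip] using this

theorem pvHeadStrip {s : List Char} {c : Char}
    (h : (PySem.Chars.strip s).head? = some c) : PySem.Chars.isspace c = false := by
  have hne : PySem.Chars.strip s ≠ [] := by intro he; rw [he] at h; simp at h
  have hpre := pvRstripPrefix (PySem.Chars.lstrip s)
  have : (PySem.Chars.lstrip s).head? = (PySem.Chars.strip s).head? :=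
    pvPrefixHead? hpre hne
  rw [h] at this
  exact pvHeadDropWhile (p := PySem.Chars.isspace) (l := s) this

theorem pvLastStrip {s : List Char} {c : Char}
    (h : (PySem.Chars.strip s).getLast? = some c) : PySem.Chars.isspace c = false := by
  have h' : (List.dropWhile PySem.Chars.isspace (PySem.Chars.lstrip s).reverse).head? = some c := by
    have := h
    unfold PySem.Chars.strip PySem.Chars.rstrip at this
    rwa [List.getLast?_reverse] at this
  exact pvHeadDropWhile h'

theorem pvStripEqSelfIff (s : List Char) :
    PySem.Chars.strip s = s ↔
      (∀ c ∈ s.head?, PySem.Chars.isspace c = false) ∧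
      (∀ c ∈ s.getLast?, PySem.Chars.isspace c = false) := by
  constructor
  · intro h
    constructor
    · intro c hc; apply pvHeadStrip (s := s); rw [h]; simpa using hc
    · intro c hc; apply pvLastStrip (s := s); rw [h]; simpa using hc
  · rintro ⟨h1, h2⟩
    cases s with
    | nil => rfl
    | cons a t =>
      have ha : PySem.Chars.isspace a = false := h1 a (by simp)
      have hl : PySem.Chars.lstrip (a :: t) = a :: t := by
        unfold PySem.Chars.lstrip
        exact List.dropWhile_cons_of_neg (by simp [ha])
      have hrev : (a :: t).reverse.head? = (a :: t).getLast? := List.head?_reverse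
      have : PySem.Chars.rstrip (a :: t) = a :: t := by
        unfold PySem.Chars.rstrip
        cases hc : (a :: t).reverse with
        | nil => simp at hc
        | cons b u =>
          have hb : PySem.Chars.isspace b = false := by
            apply h2
            rw [← hrev, hc]; simp
          have hd : List.dropWhile PySem.Chars.isspace (b :: u) = b :: u :=
            List.dropWhile_cons_of_neg (by simp [hb])
          rw [hd, ← hc, List.reverse_reverse]
      unfold PySem.Chars.strip
      rw [hl, this]

theorem pvStripIdem (s : List Char) :
    PySem.Chars.strip (PySem.Chars.strip s) = PySem.Chars.strip s := by
  rw [pvStripEqSelfIff]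
  exact ⟨fun c hc => pvHeadStrip (by simpa using hc), fun c hc => pvLastStrip (by simpa using hc)⟩

theorem pvRstripEqNil {s : List Char} (h : PySem.Chars.rstrip s = []) :
    ∀ c ∈ s, PySem.Chars.isspace c = true := by
  unfold PySem.Chars.rstrip at h
  have : List.dropWhile PySem.Chars.isspace s.reverse = [] := by
    have := congrArg List.reverse h
    simpa using this
  intro c hc
  exact List.dropWhile_eq_nil_iff.mp this c (by simpa using hc)

theorem pvStripNeNil {s : List Char} {c : Char} (h : s.head? = some c)
    (hc : PySem.Chars.isspace c = false) : PySem.Chars.strip s ≠ [] := by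
  cases s with
  | nil => simp at h
  | cons a t =>
    have ha : a = c := by simpa using h
    subst ha
    have hl : PySem.Chars.lstrip (a :: t) = a :: t := by
      unfold PySem.Chars.lstrip
      exact List.dropWhile_cons_of_neg (by simp [hc])
    intro he
    unfold PySem.Chars.strip at he
    rw [hl] at he
    have := pvRstripEqNil he a (by simp)
    rw [hc] at this; exact absurd this (by simp)

theorem pvLengthStripLe (s : List Char) : (PySem.Chars.strip s).length ≤ s.length := by
  unfold PySem.Chars.strip PySem.Chars.rstrip PySem.Chars.lstrip
  calc (List.dropWhile PySem.Chars.isspace (List.dropWhile PySem.Chars.isspace s).reverse).reverse.length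
      ≤ (List.dropWhile PySem.Chars.isspace s).reverse.length := by
        rw [List.length_reverse]; exact List.length_dropWhile_le _ _
    _ ≤ s.length := by rw [List.length_reverse]; exact List.length_dropWhile_le _ _

theorem pvStripJoin {a b : List Char} (ha : PySem.Chars.strip a = a) (ha' : a ≠ [])
    (hb : PySem.Chars.strip b = b) (hb' : b ≠ []) :
    PySem.Chars.strip (a ++ ' ' :: b) = a ++ ' ' :: b := by
  rw [pvStripEqSelfIff] at ha hb ⊢
  constructor
  · intro c hc
    apply ha.1
    cases a with
    | nil => exact absurd rfl ha'
    | cons x t => simpa using hc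
  · intro c hc
    apply hb.2
    rw [List.getLast?_append_of_ne_nil a (by simp : (' ' :: b) ≠ [])] at hc
    cases b with
    | nil => exact absurd rfl hb'
    | cons x t => simpa using hc

theorem pvGTneNl2 {s : List Char} (h : PySem.Chars.strip s = s) (h2 : s ≠ []) : s ≠ pvNl2 := by
  intro he; subst he
  have := (pvStripEqSelfIff _).mp h
  have := this.1 '\n' (by simp [pvNl2])
  simp [PySem.Chars.isspace] at this

theorem pvGTendswith {s : List Char} (h : PySem.Chars.strip s = s) (h2 : s ≠ []) :
    PySem.Chars.endswith s pvNl2 = false := by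
  by_contra hb
  have ht : PySem.Chars.endswith s pvNl2 = true := by
    cases he : PySem.Chars.endswith s pvNl2
    · exact absurd he hb
    · rfl
  have hsuf : pvNl2 <:+ s := (PySem.Chars.endswith_iff _ _).mp ht
  obtain ⟨u, rfl⟩ := hsuf
  have hl : (u ++ pvNl2).getLast? = some '\n' := by
    rw [List.getLast?_append_of_ne_nil u (by simp [pvNl2])]; simp [pvNl2]
  have := ((pvStripEqSelfIff _).mp h).2 '\n' (by rw [hl]; simp)
  simp [PySem.Chars.isspace] at this

-- ---- search layer ----

theorem pvFoldLastMem (s chars : List Char) :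
    ∀ (l : List Int) (init : Int),
      l.foldl (fun best i => if PySem.List.pyGetD s i ' ' ∈ chars then i else best) init = init ∨
      l.foldl (fun best i => if PySem.List.pyGetD s i ' ' ∈ chars then i else best) init ∈ l := by
  intro l
  induction l with
  | nil => intro init; left; rfl
  | cons a t ih =>
    intro init
    simp only [List.foldl_cons]
    by_cases hp : PySem.List.pyGetD s a ' ' ∈ chars
    · rcases ih (if PySem.List.pyGetD s a ' ' ∈ chars then a else init) with h | h
      · right; rw [h]; simp [hp]
      · right; simp [h]
    · rcases ih (if PySem.List.pyGetD s a ' ' ∈ chars then a else init) with h | h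
      · left; rw [h]; simp [hp]
      · right; simp [h]

theorem pvLastIdxBound (s chars : List Char) (lo hi : Int) :
    bLastIdx s chars lo hi = -1 ∨ (lo ≤ bLastIdx s chars lo hi ∧ bLastIdx s chars lo hi < hi) := by
  unfold bLastIdx
  rcases pvFoldLastMem s chars (PySem.List.pyRange lo hi 1) (-1) with h | h
  · left; exact h
  · right; exact (PySem.List.mem_pyRange_one).mp h

theorem pvDescAsc (s chars : List Char) (b : Int) :
    ∀ (n : Nat) (a : Int), a - b ≤ n →
      (PySem.List.pyRange (b + 1) (a + 1) 1).foldl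
          (fun best i => if PySem.List.pyGetD s i ' ' ∈ chars then i else best) (-1)
        = (match (PySem.List.pyRange a b (-1)).find?
              (fun i => decide (PySem.List.pyGetD s i ' ' ∈ chars)) with
           | some i => i
           | none => -1) := by
  intro n
  induction n with
  | zero =>
    intro a ha
    rw [PySem.List.pyRange_one_eq_nil (by omega), PySem.List.pyRange_neg_one_eq_nil (by omega)]
    rfl
  | succ n ih =>
    intro a ha
    by_cases hab : a ≤ b
    · rw [PySem.List.pyRange_one_eq_nil (by omega), PySem.List.pyRange_neg_one_eq_nil (by omega)]
      rfl
    · push_neg at hab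
      rw [PySem.List.pyRange_neg_one_cons hab]
      have h1 : PySem.List.pyRange (b + 1) (a + 1) 1
          = PySem.List.pyRange (b + 1) a 1 ++ [a] := by
        have := PySem.List.pyRange_one_succ_right (a := b + 1) (b := a) (by omega)
        simpa using this
      rw [h1, List.foldl_append]
      by_cases hp : PySem.List.pyGetD s a ' ' ∈ chars
      · rw [List.find?_cons_of_pos (by simpa using hp)]
        simp [hp]
      · rw [List.find?_cons_of_neg (by simpa using hp)]
        have h2 := ih (a - 1) (by omega)
        have h3 : (a - 1) + 1 = a := by omega
        rw [h3] at h2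
        simp only [List.foldl_cons, List.foldl_nil]
        rw [if_neg hp]
        exact h2

theorem pvFindDescMem {s chars : List Char} {a b i : Int}
    (h : (PySem.List.pyRange a b (-1)).find?
        (fun i => decide (PySem.List.pyGetD s i ' ' ∈ chars)) = some i) :
    b < i ∧ i ≤ a := by
  have hm := List.mem_of_find?_eq_some h
  rw [PySem.List.pyRange_neg_one] at hm
  simp only [List.mem_map, List.mem_range] at hm
  obtain ⟨k, hk, rfl⟩ := hm
  omega

theorem pvSearchEq (cur chars : List Char) (m lo : Int) (hlo : 0 ≤ lo) :
    aSearch cur chars m lo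
      = (if 0 ≤ bLastIdx cur chars (lo + 1) (min ((cur.length : Int) - 1) m + 1)
         then bLastIdx cur chars (lo + 1) (min ((cur.length : Int) - 1) m + 1) + 1
         else -1) := by
  unfold aSearch
  unfold bLastIdx
  rw [pvDescAsc cur chars lo ((min ((cur.length : Int) - 1) m) - lo).toNat
      (min ((cur.length : Int) - 1) m) (by omega)]
  cases hf : (PySem.List.pyRange (min ((cur.length : Int) - 1) m) lo (-1)).find?
      (fun i => decide (PySem.List.pyGetD cur i ' ' ∈ chars)) with
  | none => simp
  | some i =>
    have := pvFindDescMem hf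
    simp only []
    rw [if_pos (by omega)]

theorem pvCutEq (cur : List Char) (m : Int) (hm : 1 ≤ m) :
    aCut cur m
      = (let hi := min ((cur.length : Int) - 1) m + 1
         let p0 := bLastIdx cur ['.', '!', '?'] (max 0 (m - 200) + 1) hi
         let p := if p0 < 0 then bLastIdx cur [' ', ','] (max 0 (m - 50) + 1) hi else p0
         if 0 ≤ p then p + 1 else m) := by
  unfold aCut
  rw [pvSearchEq cur ['.', '!', '?'] m (max 0 (m - 200)) (by omega)]
  rw [pvSearchEq cur [' ', ','] m (max 0 (m - 50)) (by omega)]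
  simp only []
  split_ifs with h1 h2 h3 h4 h5 h6 h7 <;> omega

-- 1 ≤ aCut ≤ len when len > m ≥ 1
theorem pvCutBounds (cur : List Char) (m : Int) (hm : 1 ≤ m) (hl : (m : Int) < cur.length) :
    1 ≤ aCut cur m ∧ aCut cur m ≤ (cur.length : Int) := by
  rw [pvCutEq cur m hm]
  simp only []
  rcases pvLastIdxBound cur ['.', '!', '?'] (max 0 (m - 200) + 1) (min ((cur.length : Int) - 1) m + 1) with h1 | h1 <;>
    rcases pvLastIdxBound cur [' ', ','] (max 0 (m - 50) + 1) (min ((cur.length : Int) - 1) m + 1) with h2 | h2 <;>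
      split_ifs with ha hb <;> omega

-- ---- while-loop / chunking layer ----

theorem pvTakeHead {s : List Char} {c : Char} (h : s.head? = some c) (k : Nat) (hk : 1 ≤ k) :
    (s.take k).head? = some c := by
  cases s with
  | nil => simp at h
  | cons a t =>
    cases k with
    | zero => omega
    | succ k => simpa using h

theorem pvWhileEq (m : Int) (hm : 1 ≤ m) :
    ∀ (f : Nat) (cur : List Char) (parts : List (List Char)),
      cur.length < f → PySem.Chars.strip cur = cur →
      ((if (aWhile f cur m parts).2 = [] then (aWhile f cur m parts).1
        else (aWhile f cur m parts).1 ++ [(aWhile f cur m parts).2])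
          = parts ++ bChunks f cur m)
      ∧ (∀ x ∈ bChunks f cur m, x ≠ [] ∧ PySem.Chars.strip x = x) := by
  intro f
  induction f with
  | zero => intro cur parts hf _; omega
  | succ f ih =>
    intro cur parts hf hs
    by_cases hlen : (cur.length : Int) > m
    · have hcur_ne : cur ≠ [] := by
        intro he; subst he; simp at hlen; omega
      obtain ⟨c, hc⟩ : ∃ c, cur.head? = some c := by
        cases cur with
        | nil => exact absurd rfl hcur_ne
        | cons a t => exact ⟨a, rfl⟩
      have hcns : PySem.Chars.isspace c = false :=
        ((pvStripEqSelfIff cur).mp hs).1 c (by rw [hc]; simp)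
      have hb := pvCutBounds cur m hm (by omega)
      set sp := aCut cur m with hsp
      have hslice_to : PySem.List.slice cur none (some sp) = cur.take sp.toNat :=
        PySem.List.slice_to cur (by omega)
      have hslice_from : PySem.List.slice cur (some sp) none = cur.drop sp.toNat :=
        PySem.List.slice_from cur (by omega)
      have hpiece_ne : PySem.Chars.strip (PySem.List.slice cur none (some sp)) ≠ [] := by
        rw [hslice_to]
        exact pvStripNeNil (pvTakeHead hc sp.toNat (by omega)) hcns
      have hcur' : (PySem.Chars.strip (PySem.List.slice cur (some sp) none)).length < f := by
        rw [hslice_from]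
        have h1 := pvLengthStripLe (cur.drop sp.toNat)
        have h2 : (cur.drop sp.toNat).length = cur.length - sp.toNat := List.length_drop ..
        omega
      have hstrip' := pvStripIdem (PySem.List.slice cur (some sp) none)
      have IH := ih (PySem.Chars.strip (PySem.List.slice cur (some sp) none))
        (parts ++ [PySem.Chars.strip (PySem.List.slice cur none (some sp))]) hcur' hstrip'
      have hunf : aWhile (f + 1) cur m parts
          = aWhile f (PySem.Chars.strip (PySem.List.slice cur (some sp) none)) m
              (parts ++ [PySem.Chars.strip (PySem.List.slice cur none (some sp))]) := by
        rw [aWhile]; rw [if_pos hlen]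
      have hchunks : bChunks (f + 1) cur m
          = PySem.Chars.strip (PySem.List.slice cur none (some sp)) ::
              bChunks f (PySem.Chars.strip (PySem.List.slice cur (some sp) none)) m := by
        rw [bChunks]
        rw [if_neg (by omega)]
        simp only []
        rw [← pvCutEq cur m hm, ← hsp]
      constructor
      · rw [hunf, hchunks, IH.1]
        simp
      · rw [hchunks]
        intro x hx
        rcases List.mem_cons.mp hx with rfl | hx
        · exact ⟨hpiece_ne, pvStripIdem _⟩
        · exact IH.2 x hx
    · have hunf : aWhile (f + 1) cur m parts = (parts, cur) := by
        rw [aWhile]; rw [if_neg hlen]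
      have hchunks : bChunks (f + 1) cur m = if cur = [] then [] else [cur] := by
        rw [bChunks]; rw [if_pos (by omega)]
      constructor
      · rw [hunf, hchunks]
        by_cases hc : cur = [] <;> simp [hc]
      · rw [hchunks]
        intro x hx
        by_cases hc : cur = []
        · simp [hc] at hx
        · simp [hc] at hx; subst hx; exact ⟨hc, hs⟩

theorem pvChunksNe (m : Int) (f : Nat) (cur : List Char) (hf : 0 < f) (hc : cur ≠ []) :
    bChunks f cur m ≠ [] := by
  cases f with
  | zero => omega
  | succ f =>
    rw [bChunks]
    by_cases h : (cur.length : Int) ≤ m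
    · rw [if_pos h, if_neg hc]; simp
    · rw [if_neg h]; simp

-- ---- consolidation fusion layer ----

def pvJoin (blk piece : List Char) : List Char := if blk = [] then piece else blk ++ ' ' :: piece

theorem pvJoinFold (cs : List (List Char)) :
    ∀ (blk : List Char),
      (∀ x ∈ cs, x ≠ [] ∧ PySem.Chars.strip x = x) → PySem.Chars.strip blk = blk →
      PySem.Chars.strip (cs.foldl pvJoin blk) = cs.foldl pvJoin blk
      ∧ (cs.foldl pvJoin blk = [] ↔ (blk = [] ∧ cs = [])) := by
  induction cs with
  | nil => intro blk _ hb; exact ⟨hb, by simp⟩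
  | cons x t ih =>
    intro blk hcs hb
    have hx := hcs x (by simp)
    have hblk1 : PySem.Chars.strip (pvJoin blk x) = pvJoin blk x := by
      unfold pvJoin
      by_cases h : blk = []
      · rw [if_pos h]; exact hx.2
      · rw [if_neg h]; exact pvStripJoin hb h hx.2 hx.1
    have hblk1ne : pvJoin blk x ≠ [] := by
      unfold pvJoin
      by_cases h : blk = []
      · rw [if_pos h]; exact hx.1
      · rw [if_neg h]; simp [h]
    have IH := ih (pvJoin blk x) (fun y hy => hcs y (by simp [hy])) hblk1
    refine ⟨by simpa using IH.1, ?_⟩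
    simp only [List.foldl_cons]
    rw [IH.2]
    simp [hblk1ne]

theorem pvConsChunks (cs : List (List Char)) :
    ∀ (out : List (List Char)) (blk : List Char),
      (∀ x ∈ cs, x ≠ [] ∧ PySem.Chars.strip x = x) → PySem.Chars.strip blk = blk →
      cs.foldl aCons (out, blk) = (out, cs.foldl pvJoin blk) := by
  induction cs with
  | nil => intro out blk _ _; rfl
  | cons x t ih =>
    intro out blk hcs hb
    have hx := hcs x (by simp)
    have hstep : aCons (out, blk) x = (out, pvJoin blk x) := by
      unfold aCons pvJoin
      rw [if_neg (pvGTneNl2 hx.2 hx.1)]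
      by_cases h : blk = []
      · rw [if_neg (by simp [h]), if_pos h]
        simp [hx.2]
      · rw [if_pos ⟨h, pvGTendswith hb h⟩, if_neg h]
    have hblk1 : PySem.Chars.strip (pvJoin blk x) = pvJoin blk x := by
      unfold pvJoin
      by_cases h : blk = []
      · rw [if_pos h]; exact hx.2
      · rw [if_neg h]; exact pvStripJoin hb h hx.2 hx.1
    simp only [List.foldl_cons, hstep]
    exact ih out (pvJoin blk x) (fun y hy => hcs y (by simp [hy])) hblk1

-- ---- main invariant ----

def pvInv (parts : List (List Char)) (st : List (List Char) × List Char) : Prop :=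
  parts.foldl aCons ([], []) = st
  ∧ (parts = [] ↔ (st.1 = [] ∧ st.2 = []))
  ∧ (parts.getLast? = some pvNl2 ↔ (st.2 = [] ∧ st.1.getLast? = some pvNl2))
  ∧ (∀ x ∈ st.1, x = pvNl2 ∨ (x ≠ [] ∧ PySem.Chars.strip x = x))
  ∧ PySem.Chars.strip st.2 = st.2

theorem pvGetLastNe {xs : List (List Char)} (h : xs ≠ []) :
    PySem.List.pyGetD xs (-1) [] = xs.getLast h := PySem.List.pyGetD_neg_one xs [] h

theorem pvStep (m : Int) (hm : 1 ≤ m) (parts : List (List Char))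
    (st : List (List Char) × List Char) (q : List Char) (h : pvInv parts st) :
    pvInv (aParaStep m parts q) (bParaStep m st q) := by
  obtain ⟨out, blk⟩ := st
  obtain ⟨hfold, hempty, hlast, hout, hblk⟩ := h
  simp only [] at hfold hempty hlast hout hblk
  by_cases hp : PySem.Chars.strip q = []
  · -- blank paragraph
    have hA : aParaStep m parts q =
        if parts ≠ [] ∧ PySem.List.pyGetD parts (-1) [] ≠ pvNl2 then parts ++ [pvNl2]
        else parts := by
      simp only [aParaStep, hp, if_true]
    have hB : bParaStep m (out, blk) q =
        (if (if blk = [] then out else out ++ [blk]) ≠ [] ∧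
            PySem.List.pyGetD (if blk = [] then out else out ++ [blk]) (-1) [] ≠ pvNl2
         then (if blk = [] then out else out ++ [blk]) ++ [pvNl2]
         else (if blk = [] then out else out ++ [blk]), ([] : List Char)) := by
      simp only [bParaStep, hp, if_true]
    by_cases hpe : parts = []
    · -- nothing accumulated yet: both sides unchanged
      obtain ⟨ho, hb⟩ := hempty.mp hpe
      subst hpe; subst ho; subst hb
      rw [hA, hB]
      rw [if_neg (by simp), if_pos rfl, if_neg (by simp)]
      exact ⟨rfl, by simp, by simp, by simp, rfl⟩
    · have hfin : (if blk = [] then out else out ++ [blk]) ≠ [] := by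
        by_cases hb : blk = []
        · rw [if_pos hb]
          intro ho
          exact hpe (hempty.mpr ⟨ho, hb⟩)
        · rw [if_neg hb]; simp
      by_cases hL : parts.getLast? = some pvNl2
      · -- last emitted item is already a paragraph break: both sides unchanged
        obtain ⟨hb, hol⟩ := hlast.mp hL
        have hone : out ≠ [] := by intro ho; rw [ho] at hol; simp at hol
        have hAcond : ¬ (parts ≠ [] ∧ PySem.List.pyGetD parts (-1) [] ≠ pvNl2) := by
          rintro ⟨_, hne⟩
          apply hne
          rw [pvGetLastNe hpe]
          rw [List.getLast?_eq_some_getLast (l := parts) hpe] at hL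
          exact Option.some.inj hL
        have hBcond : ¬ ((if blk = [] then out else out ++ [blk]) ≠ [] ∧
            PySem.List.pyGetD (if blk = [] then out else out ++ [blk]) (-1) [] ≠ pvNl2) := by
          rw [if_pos hb]
          rintro ⟨_, hne⟩
          apply hne
          rw [pvGetLastNe hone]
          rw [List.getLast?_eq_some_getLast (l := out) hone] at hol
          exact Option.some.inj hol
        rw [hA, hB, if_neg hAcond, if_neg hBcond, if_pos hb]
        subst hb
        exact ⟨hfold, hempty, hlast, hout, hblk⟩
      · -- flush the block and emit a paragraph break on both sides
        have hAcond : parts ≠ [] ∧ PySem.List.pyGetD parts (-1) [] ≠ pvNl2 := by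
          refine ⟨hpe, ?_⟩
          rw [pvGetLastNe hpe]
          intro he
          apply hL
          rw [List.getLast?_eq_some_getLast (l := parts) hpe, he]
        set fin := if blk = [] then out else out ++ [blk] with hfin_def
        have hcons : aCons (out, blk) pvNl2 =
            (if fin = [] ∨ PySem.List.pyGetD fin (-1) [] ≠ pvNl2 then fin ++ [pvNl2] else fin,
             ([] : List Char)) := by
          simp only [aCons, if_true]
          rw [← hfin_def]
        have hfoldA : (parts ++ [pvNl2]).foldl aCons ([], []) = aCons (out, blk) pvNl2 := by
          rw [List.foldl_append, hfold]; rfl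
        have hfinmem : ∀ x ∈ fin, x = pvNl2 ∨ (x ≠ [] ∧ PySem.Chars.strip x = x) := by
          intro x hx
          rw [hfin_def] at hx
          by_cases hb : blk = []
          · rw [if_pos hb] at hx; exact hout x hx
          · rw [if_neg hb] at hx
            rcases List.mem_append.mp hx with h1 | h1
            · exact hout x h1
            · simp at h1; subst h1; exact Or.inr ⟨hb, hblk⟩
        have main : ∀ (F : List (List Char)), F ≠ [] → F.getLast? = some pvNl2 →
            (∀ x ∈ F, x = pvNl2 ∨ (x ≠ [] ∧ PySem.Chars.strip x = x)) →
            (parts ++ [pvNl2]).foldl aCons ([], []) = (F, []) →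
            pvInv (parts ++ [pvNl2]) (F, []) := by
          intro F h1 h2 h3 h4
          refine ⟨h4, ?_, ?_, h3, rfl⟩
          · constructor
            · intro hh; exact absurd hh (by simp)
            · rintro ⟨hF, _⟩; exact absurd hF h1
          · simp only []
            rw [List.getLast?_concat]
            simp [h2]
        rw [hA, hB, if_pos hAcond]
        by_cases hX : PySem.List.pyGetD fin (-1) [] ≠ pvNl2
        · rw [if_pos ⟨hfin, hX⟩]
          apply main
          · simp
          · rw [List.getLast?_concat]
          · intro x hx
            rcases List.mem_append.mp hx with h1 | h1
            · exact hfinmem x h1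
            · simp at h1; subst h1; exact Or.inl rfl
          · rw [hfoldA, hcons, if_pos (Or.inr hX)]
        · rw [if_neg (by rintro ⟨_, hc⟩; exact hX hc)]
          push_neg at hX
          apply main
          · exact hfin
          · rw [List.getLast?_eq_some_getLast (l := fin) hfin, ← pvGetLastNe hfin, hX]
          · exact hfinmem
          · rw [hfoldA, hcons, if_neg]
            push_neg
            exact ⟨hfin, hX⟩
  · -- non-blank paragraph
    have hlt : (PySem.Chars.strip q).length < (PySem.Chars.strip q).length + 1 :=
      Nat.lt_succ_self _
    have hW := pvWhileEq m hm ((PySem.Chars.strip q).length + 1) (PySem.Chars.strip q) parts hlt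
      (pvStripIdem q)
    set cs := bChunks ((PySem.Chars.strip q).length + 1) (PySem.Chars.strip q) m with hcs_def
    have hcsne : cs ≠ [] := pvChunksNe m _ _ (Nat.succ_pos _) hp
    have hcsGT := hW.2
    have hA : aParaStep m parts q = parts ++ cs := by
      simp only [aParaStep]
      rw [if_neg hp]
      exact hW.1
    have hB : bParaStep m (out, blk) q = (out, cs.foldl pvJoin blk) := by
      simp only [bParaStep]
      rw [if_neg hp]
      rfl
    have hJF := pvJoinFold cs blk hcsGT hblk
    have hCC := pvConsChunks cs out blk hcsGT hblk
    have hblkne : cs.foldl pvJoin blk ≠ [] := by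
      rw [Ne, hJF.2]; rintro ⟨_, hc⟩; exact hcsne hc
    rw [hA, hB]
    refine ⟨?_, ?_, ?_, hout, hJF.1⟩
    · rw [List.foldl_append, hfold]
      exact hCC
    · constructor
      · intro hh
        rcases List.append_eq_nil_iff.mp hh with ⟨_, hc⟩
        exact absurd hc hcsne
      · rintro ⟨_, hb2⟩
        exact absurd hb2 hblkne
    · have hlastcs : (parts ++ cs).getLast? = some (cs.getLast hcsne) := by
        rw [List.getLast?_append_of_ne_nil parts hcsne,
          List.getLast?_eq_some_getLast (l := cs) hcsne]
      constructor
      · intro hh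
        rw [hlastcs] at hh
        have hmem : cs.getLast hcsne ∈ cs := List.getLast_mem hcsne
        have hgt := hcsGT _ hmem
        exact absurd (Option.some.inj hh) (pvGTneNl2 hgt.2 hgt.1)
      · rintro ⟨hb2, _⟩
        exact absurd hb2 hblkne

theorem pvFoldInv (m : Int) (hm : 1 ≤ m) :
    ∀ (ps : List (List Char)) (parts : List (List Char)) (st : List (List Char) × List Char),
      pvInv parts st →
      pvInv (ps.foldl (aParaStep m) parts) (ps.foldl (bParaStep m) st) := by
  intro ps
  induction ps with
  | nil => intro parts st h; exact h
  | cons q t ih =>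
    intro parts st h
    exact ih _ _ (pvStep m hm parts st q h)

theorem pvBlankOnly (m : Int) :
    ∀ (ps : List (List Char)), (∀ q ∈ ps, PySem.Chars.strip q = []) →
      ps.foldl (aParaStep m) [] = [] ∧ ps.foldl (bParaStep m) ([], []) = ([], []) := by
  intro ps
  induction ps with
  | nil => intro _; exact ⟨rfl, rfl⟩
  | cons q t ih =>
    intro h
    have hq := h q (by simp)
    have h1 : aParaStep m [] q = [] := by
      rw [aParaStep]; simp [hq]
    have h2 : bParaStep m ([], []) q = ([], []) := by
      rw [bParaStep]; simp [hq]
    simp only [List.foldl_cons, h1, h2]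
    exact ih (fun x hx => h x (by simp [hx]))

-- ===== VERDICT (by name: the statement is the Claim_ definition above) =====
theorem simple_splitter_by_paragraph_and_length_spec : Claim_equal_simple_splitter_by_paragraph_and_length := by
  intro text m _hdom hpre
  unfold Spec_simple_splitter_by_paragraph_and_length
  unfold simple_splitter_by_paragraph_and_length simple_splitter_by_paragraph_and_length_alt
  rcases hpre with hm | hblank
  · have hinit : pvInv [] ([], []) := by
      refine ⟨rfl, by simp, by simp, by simp, rfl⟩
    have hinv := pvFoldInv m hm (PySem.Chars.splitOn text.toList ['\n']) [] ([], []) hinit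
    obtain ⟨hfold, hempty, hlast, hout, hblk⟩ := hinv
    set parts := (PySem.Chars.splitOn text.toList ['\n']).foldl (aParaStep m) [] with hparts
    set st := (PySem.Chars.splitOn text.toList ['\n']).foldl (bParaStep m) ([], []) with hst
    simp only []
    rw [hfold]
    congr 1
    apply List.filter_eq_self.mpr
    intro x hx
    have hx' : x = pvNl2 ∨ (x ≠ [] ∧ PySem.Chars.strip x = x) := by
      by_cases hb : st.2 = []
      · rw [if_pos hb] at hx; exact hout x hx
      · rw [if_neg hb] at hx
        rcases List.mem_append.mp hx with h | h
        · exact hout x h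
        · simp at h; subst h; exact Or.inr ⟨hb, hblk⟩
    rcases hx' with rfl | ⟨hne, hsx⟩
    · simp
    · have : PySem.Chars.strip x ≠ [] := by rw [hsx]; exact hne
      simp [this]
  · have h := pvBlankOnly m (PySem.Chars.splitOn text.toList ['\n']) hblank
    rw [h.1, h.2]
    rfl
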